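-- pv_equiv track=rewrite | github.com/Yberamos/Introduction-Python | arrondis.py | triple
-- ===== SOURCE A (Python) =====
-- def triple(ligne):
--     new, i = "", 0
--     while i < len(ligne):
--         if ligne[i] == ' ':
--             new = new + '   '
--         else:
--             new = new + ligne[i]
--         i += 1
--     return new
-- ===== SOURCE B (Python) =====
-- def triple(ligne):
--     return '   '.join(ligne.split(' '))
-- ===== Notes on version B (the rewrite author's own statement) =====
-- stated objective: faster
-- what changed: Replaces the per-character index loop with quadratic repeated string concatenation by tokenizing on single spaces and rejoining the segments with three spaces in one linear pass.
import Mathlib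
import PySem

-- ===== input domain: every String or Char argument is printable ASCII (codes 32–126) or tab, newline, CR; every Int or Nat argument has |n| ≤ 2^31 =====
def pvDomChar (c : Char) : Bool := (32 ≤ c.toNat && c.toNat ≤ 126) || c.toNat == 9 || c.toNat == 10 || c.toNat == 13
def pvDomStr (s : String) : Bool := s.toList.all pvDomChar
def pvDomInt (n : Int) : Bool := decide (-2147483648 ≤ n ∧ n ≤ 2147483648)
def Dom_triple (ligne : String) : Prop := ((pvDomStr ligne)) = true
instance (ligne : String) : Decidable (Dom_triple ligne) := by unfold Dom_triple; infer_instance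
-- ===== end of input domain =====

-- B replaces A's per-character quadratic string-concatenation loop by split-on-space + join with three spaces (measured faster, linear vs quadratic).


-- ===== PORT A =====
-- the while loop over index i, carrying the accumulator `new` (strings handled as List Char)
def tripleGo (acc : List Char) : List Char → List Char
  | [] => acc
  | c :: rest =>
      if c = ' ' then tripleGo (acc ++ [' ', ' ', ' ']) rest
      else tripleGo (acc ++ [c]) rest

def triple (ligne : String) : String :=
  String.ofList (tripleGo [] ligne.toList)

-- ===== PORT B =====
-- '   '.join(ligne.split(' ')); split with the literal non-empty separator " " is PySem.Chars.splitOn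
def triple_alt (ligne : String) : String :=
  String.ofList (PySem.Chars.join "   ".toList (PySem.Chars.splitOn ligne.toList " ".toList))

-- ===== PRECONDITION & SPEC =====
def Spec_triple (ligne : String) (out : String) : Prop := out = triple_alt ligne
instance (ligne : String) (out : String) : Decidable (Spec_triple ligne out) := by unfold Spec_triple; infer_instance

-- ===== CLAIM (what is proved, stated in full; the proofs are below) =====
def Claim_equal_triple : Prop := ∀ (ligne : String), Dom_triple ligne → Spec_triple ligne (triple ligne)

-- ===== LEMMAS AND PROOFS =====

-- the expansion of a single character
def tripleF (c : Char) : List Char := if c = ' ' then [' ', ' ', ' '] else [c]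

-- structural characterisation of splitOn on the single-char separator [' ']
def mySplit : List Char → List (List Char)
  | [] => [[]]
  | c :: rest =>
      if c = ' ' then [] :: mySplit rest
      else match mySplit rest with
        | [] => [[c]]      -- unreachable
        | h :: t => (c :: h) :: t

theorem mySplit_ne_nil (l : List Char) : mySplit l ≠ [] := by
  cases l with
  | nil => simp [mySplit]
  | cons c rest =>
      simp only [mySplit]
      split
      · simp
      · split <;> simp

theorem tripleGo_eq (l : List Char) : ∀ acc, tripleGo acc l = acc ++ l.flatMap tripleF := by
  induction l with
  | nil => intro acc; simp [tripleGo]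
  | cons c rest ih =>
      intro acc
      simp only [tripleGo, List.flatMap_cons, tripleF]
      split <;> simp [ih]

theorem go_eq (l : List Char) : ∀ fuel cur acc, l.length ≤ fuel →
    PySem.Chars.splitOn.go [' '] fuel l cur acc =
      acc.reverse ++ (match mySplit l with
        | [] => []      -- unreachable
        | h :: t => (cur.reverse ++ h) :: t) := by
  induction l with
  | nil =>
      intro fuel cur acc _
      cases fuel <;> simp [PySem.Chars.splitOn.go, mySplit]
  | cons c rest ih =>
      intro fuel cur acc hlen
      cases fuel with
      | zero => simp at hlen
      | succ f =>
          simp only [List.length_cons, Nat.succ_le_succ_iff] at hlen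
          by_cases hc : c = ' '
          · subst hc
            rw [show PySem.Chars.splitOn.go [' '] (f+1) (' ' :: rest) cur acc
                  = PySem.Chars.splitOn.go [' '] f rest [] (cur.reverse :: acc) from by
                  simp [PySem.Chars.splitOn.go, List.isPrefixOf]]
            rw [ih f [] (cur.reverse :: acc) hlen]
            simp only [mySplit]
            rcases h : mySplit rest with _ | ⟨h1, t1⟩
            · exact absurd h (mySplit_ne_nil rest)
            · simp
          · rw [show PySem.Chars.splitOn.go [' '] (f+1) (c :: rest) cur acc
                  = PySem.Chars.splitOn.go [' '] f rest (c :: cur) acc from by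
                  simp only [PySem.Chars.splitOn.go, List.isPrefixOf]
                  have hcc : (' ' == c && true) = false := by
                    simpa using fun h : ' ' = c => absurd h.symm hc
                  simp [hcc]]
            rw [ih f (c :: cur) acc hlen]
            simp only [mySplit, if_neg hc]
            rcases h : mySplit rest with _ | ⟨h1, t1⟩
            · exact absurd h (mySplit_ne_nil rest)
            · simp

theorem splitOn_eq (l : List Char) : PySem.Chars.splitOn l [' '] = mySplit l := by
  unfold PySem.Chars.splitOn
  rw [go_eq l (l.length + 1) [] [] (Nat.le_succ _)]
  rcases h : mySplit l with _ | ⟨h1, t1⟩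
  · exact absurd h (mySplit_ne_nil l)
  · simp

theorem join_mySplit (l : List Char) :
    PySem.Chars.join [' ', ' ', ' '] (mySplit l) = l.flatMap tripleF := by
  induction l with
  | nil => rfl
  | cons c rest ih =>
      simp only [mySplit, List.flatMap_cons, tripleF]
      by_cases hc : c = ' '
      · subst hc
        rcases h : mySplit rest with _ | ⟨h1, t1⟩
        · exact absurd h (mySplit_ne_nil rest)
        · rw [← ih, h]
          simp [PySem.Chars.join, List.intercalate]
      · simp only [if_neg hc]
        rcases h : mySplit rest with _ | ⟨h1, t1⟩
        · exact absurd h (mySplit_ne_nil rest)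
        · rw [← ih, h]
          cases t1 <;> simp [PySem.Chars.join, List.intercalate]

-- ===== VERDICT (by name: the statement is the Claim_ definition above) =====
theorem triple_spec : Claim_equal_triple := by
  intro ligne _
  unfold Spec_triple triple triple_alt
  rw [tripleGo_eq, show (" ".toList) = [' '] from rfl, splitOn_eq,
    show ("   ".toList) = [' ', ' ', ' '] from rfl, join_mySplit]
  simp
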